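-- pv_equiv track=rewrite | github.com/bsumser/AOC | 2024/day9.py | find_chunks
-- ===== SOURCE A (Python) =====
-- def find_chunks(files):
--   chunks = []
--   cur_chunk = [files[0]]
--   chunk_dict = {}
--   for i in range(1, len(files)):
--     if (files[i] == files[i-1]):
--        cur_chunk.append(files[i])
--     else:
--       chunks.append(cur_chunk)
--       cur_chunk = [files[i]]
--   chunks.append(cur_chunk)
--   return chunks
-- ===== SOURCE B (Python) =====
-- def find_chunks(files):
--     chunks = []
--     i = 0
--     n = len(files)
--     while i < n:
--         j = i + 1
--         while j < n and files[j] == files[i]: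
--             j += 1
--         chunks.append(files[i:j])
--         i = j
--     return chunks
-- ===== Notes on version B (the rewrite author's own statement) =====
-- stated objective: alternative
-- what changed: A appends each element one at a time to a growing current-chunk list inside a single indexed for-loop; B is a two-pointer scan that finds each run's end with an inner while loop and slices the whole run out of the list at once.
import Mathlib
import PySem

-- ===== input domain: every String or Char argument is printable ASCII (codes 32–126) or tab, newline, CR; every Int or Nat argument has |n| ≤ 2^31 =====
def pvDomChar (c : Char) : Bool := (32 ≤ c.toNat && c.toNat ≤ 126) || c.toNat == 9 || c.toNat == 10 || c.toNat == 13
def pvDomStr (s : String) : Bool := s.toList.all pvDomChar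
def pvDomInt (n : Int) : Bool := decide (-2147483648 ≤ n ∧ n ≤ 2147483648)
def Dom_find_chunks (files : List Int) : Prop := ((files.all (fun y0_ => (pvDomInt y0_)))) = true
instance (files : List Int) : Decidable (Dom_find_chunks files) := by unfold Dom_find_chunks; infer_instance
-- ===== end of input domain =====

-- B re-implements run-grouping as a two-pointer scan that slices out whole runs, instead of A's
-- element-by-element accumulator loop; objective: alternative decomposition, same O(n) cost.

-- ===== PORT A =====
-- loop body of A's 'for i in range(1, len(files))' (st = (chunks, cur_chunk))
def pvStepA (files : List Int) (st : List (List Int) × List Int) (i : Int) :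
    List (List Int) × List Int :=
  if PySem.List.pyGetD files i 0 == PySem.List.pyGetD files (i - 1) 0 then
    (st.1, st.2 ++ [PySem.List.pyGetD files i 0])
  else
    (st.1 ++ [st.2], [PySem.List.pyGetD files i 0])

-- A's 'chunk_dict = {}' is never used and is omitted.  Reading the first element raises IndexError on the empty list — excluded by Pre_.
def find_chunks (files : List Int) : List (List Int) :=
  let chunks : List (List Int) := []
  let cur_chunk : List Int := [PySem.List.pyGetD files 0 0]
  let st := (PySem.List.pyRange 1 (files.length : Int) 1).foldl (pvStepA files) (chunks, cur_chunk)
  st.1 ++ [st.2]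

-- ===== PORT B =====
-- inner 'while j < n and files[j] == files[i]: j += 1' of Source B
def pvFindRunEnd (files : List Int) (i : Nat) (j : Nat) : Nat :=
  if j < files.length then
    if files.getD j 0 == files.getD i 0 then pvFindRunEnd files i (j + 1) else j
  else j
termination_by files.length - j

theorem pvFindRunEnd_ge (files : List Int) (i j : Nat) : j ≤ pvFindRunEnd files i j := by
  unfold pvFindRunEnd
  split
  · split
    · exact Nat.le_trans (Nat.le_succ j) (pvFindRunEnd_ge files i (j + 1))
    · exact Nat.le_refl j
  · exact Nat.le_refl j
termination_by files.length - j

-- outer 'while i < n' of Source B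
def pvOuter (files : List Int) (chunks : List (List Int)) (i : Nat) : List (List Int) :=
  if i < files.length then
    let j := pvFindRunEnd files i (i + 1)
    pvOuter files (chunks ++ [PySem.List.slice files (some (i : Int)) (some (j : Int))]) j
  else chunks
termination_by files.length - i
decreasing_by
  have := pvFindRunEnd_ge files i (i + 1)
  omega

def find_chunks_alt (files : List Int) : List (List Int) :=
  pvOuter files [] 0

-- ===== PRECONDITION & SPEC =====
-- A reads the first element before its loop, so it raises IndexError on the empty list; Pre_ excludes exactly that input.
def Pre_find_chunks (files : List Int) : Prop := files ≠ []
instance (files : List Int) : Decidable (Pre_find_chunks files) := by unfold Pre_find_chunks; infer_instance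
def pvWitness_find_chunks : List Int := [1, 1, 2]

def Spec_find_chunks (files : List Int) (out : List (List Int)) : Prop := out = find_chunks_alt files
instance (files : List Int) (out : List (List Int)) : Decidable (Spec_find_chunks files out) := by unfold Spec_find_chunks; infer_instance

-- ===== CLAIM (what is proved, stated in full; the proofs are below) =====
def Claim_equal_find_chunks : Prop := ∀ (files : List Int), Dom_find_chunks files → Pre_find_chunks files → Spec_find_chunks files (find_chunks files)

-- ===== LEMMAS AND PROOFS =====

-- canonical description of the result: the list of maximal runs
def pvRuns : List Int → List (List Int)
  | [] => []
  | x :: xs => (x :: xs.takeWhile (· == x)) :: pvRuns (xs.dropWhile (· == x))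
termination_by l => l.length
decreasing_by
  have := List.length_dropWhile_le (· == x) xs
  simp
  omega

-- A's loop as structural recursion on the remaining elements (prev = last element seen)
def pvLoopA : List (List Int) → List Int → Int → List Int → List (List Int) × List Int
  | chunks, cur, _, [] => (chunks, cur)
  | chunks, cur, prev, y :: ys =>
    if y == prev then pvLoopA chunks (cur ++ [y]) y ys
    else pvLoopA (chunks ++ [cur]) [y] y ys

theorem pv_take_drop_takeWhile (p : Int → Bool) (xs : List Int) :
    xs.take (xs.takeWhile p).length = xs.takeWhile p ∧
    xs.drop (xs.takeWhile p).length = xs.dropWhile p := by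
  induction xs with
  | nil => simp
  | cons x xs ih =>
    by_cases h : p x
    · simpa [h] using ih
    · simp [h]

-- Phase A1: the indexed foldl of A is pvLoopA
theorem pvA_loop (l : List Int) (a : Nat) (h : a < l.length)
    (chunks : List (List Int)) (cur : List Int) :
    (PySem.List.pyRange ((a : Int) + 1) (l.length : Int) 1).foldl (pvStepA l) (chunks, cur) =
      pvLoopA chunks cur (l[a]'h) (l.drop (a + 1)) := by
  by_cases hend : a + 1 < l.length
  · have hlt : ((a : Int) + 1) < (l.length : Int) := by exact_mod_cast hend
    rw [PySem.List.pyRange_one_cons hlt, List.foldl_cons, List.drop_eq_getElem_cons hend]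
    have hga1 : PySem.List.pyGetD l ((a : Int) + 1) 0 = l[a + 1]'hend := by
      have hc : ((a : Int) + 1) = ((a + 1 : Nat) : Int) := by omega
      rw [hc, PySem.List.pyGetD_natCast]
      exact List.getD_eq_getElem l 0 hend
    have hga : PySem.List.pyGetD l ((a : Int) + 1 - 1) 0 = l[a]'h := by
      have hc : ((a : Int) + 1 - 1) = ((a : Nat) : Int) := by omega
      rw [hc, PySem.List.pyGetD_natCast]
      exact List.getD_eq_getElem l 0 h
    have hstep : ((a : Int) + 1 + 1) = (((a + 1 : Nat) : Int)) + 1 := by omega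
    have hstepA : pvStepA l (chunks, cur) ((a : Int) + 1) =
        if (l[a + 1]'hend == l[a]'h) = true then (chunks, cur ++ [l[a + 1]'hend])
        else (chunks ++ [cur], [l[a + 1]'hend]) := by
      simp only [pvStepA, hga1, hga]
    rw [hstepA, pvLoopA]
    by_cases he : (l[a + 1]'hend == l[a]'h) = true
    · simp only [he, if_true]
      rw [hstep, pvA_loop l (a + 1) hend]
    · simp only [he, Bool.false_eq_true, if_false]
      rw [hstep, pvA_loop l (a + 1) hend]
  · have h1 : (l.length : Int) ≤ (a : Int) + 1 := by exact_mod_cast (by omega : l.length ≤ a + 1)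
    rw [PySem.List.pyRange_one_eq_nil h1, List.drop_eq_nil_of_le (by omega)]
    rfl
termination_by l.length - a

-- Phase A2: pvLoopA produces the runs
theorem pvLoopA_runs (xs : List Int) : ∀ (chunks : List (List Int)) (cur : List Int) (x : Int),
    (pvLoopA chunks cur x xs).1 ++ [(pvLoopA chunks cur x xs).2] =
      chunks ++ ((cur ++ xs.takeWhile (· == x)) :: pvRuns (xs.dropWhile (· == x))) := by
  induction xs with
  | nil => intro chunks cur x; simp [pvLoopA, pvRuns]
  | cons y ys ih =>
    intro chunks cur x
    by_cases h : y = x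
    · subst h
      simp only [pvLoopA, beq_self_eq_true, if_true, List.takeWhile_cons, List.dropWhile_cons]
      rw [ih]
      simp
    · have hb : (y == x) = false := by simp [h]
      simp only [pvLoopA, hb, Bool.false_eq_true, if_false, List.takeWhile_cons, List.dropWhile_cons]
      rw [ih]
      simp [pvRuns]

-- Phase B1: pvFindRunEnd finds the end of the run of files[i]
theorem pvFindRunEnd_eq (l : List Int) (i j : Nat) :
    pvFindRunEnd l i j = j + ((l.drop j).takeWhile (· == l.getD i 0)).length := by
  unfold pvFindRunEnd
  by_cases h : j < l.length
  · rw [if_pos h, List.drop_eq_getElem_cons h]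
    have hg : l.getD j 0 = l[j] := List.getD_eq_getElem l 0 h
    rw [hg, List.takeWhile_cons]
    by_cases he : (l[j] == l.getD i 0) = true
    · rw [if_pos he, he, pvFindRunEnd_eq l i (j + 1)]
      simp only [if_true, List.length_cons]
      omega
    · rw [if_neg he]
      rw [Bool.not_eq_true] at he
      rw [he]
      simp
  · rw [if_neg h, List.drop_eq_nil_of_le (by omega)]
    simp
termination_by l.length - j

-- Phase B2: the outer loop of B produces the runs
theorem pvOuter_runs (l : List Int) (i : Nat) : ∀ (chunks : List (List Int)),
    pvOuter l chunks i = chunks ++ pvRuns (l.drop i) := by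
  intro chunks
  unfold pvOuter
  by_cases h : i < l.length
  · rw [if_pos h]
    have hgi : l.getD i 0 = l[i] := List.getD_eq_getElem l 0 h
    have hj : pvFindRunEnd l i (i + 1) =
        i + 1 + ((l.drop (i + 1)).takeWhile (· == l[i])).length := by
      rw [pvFindRunEnd_eq, hgi]
    set k := ((l.drop (i + 1)).takeWhile (· == l[i])).length with hk
    have htd := pv_take_drop_takeWhile (· == l[i]) (l.drop (i + 1))
    have hdropi : l.drop i = l[i] :: l.drop (i + 1) := List.drop_eq_getElem_cons h
    have hslice : PySem.List.slice l (some (i : Int))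
          (some ((pvFindRunEnd l i (i + 1) : Nat) : Int)) =
        l[i] :: (l.drop (i + 1)).takeWhile (· == l[i]) := by
      rw [PySem.List.slice_natCast, hj, hdropi]
      have h2 : (i + 1 + k) - i = k + 1 := by omega
      rw [h2, List.take_succ_cons, htd.1]
    have hdd : l.drop (i + 1 + k) = (l.drop (i + 1)).drop k := by
      rw [List.drop_drop]
    have hdropj : l.drop (pvFindRunEnd l i (i + 1)) = (l.drop (i + 1)).dropWhile (· == l[i]) := by
      rw [hj, hdd, htd.2]
    rw [pvOuter_runs l (pvFindRunEnd l i (i + 1)), hslice, hdropj, hdropi, pvRuns]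
    simp
  · rw [if_neg h, List.drop_eq_nil_of_le (by omega)]
    simp [pvRuns]
termination_by l.length - i
decreasing_by
  have := pvFindRunEnd_ge l i (i + 1)
  omega

-- ===== VERDICT (by name: the statement is the Claim_ definition above) =====
theorem find_chunks_spec : Claim_equal_find_chunks := by
  intro files _ hpre
  unfold Spec_find_chunks
  match files with
  | [] => exact absurd rfl hpre
  | x :: xs =>
    have h0 : 0 < (x :: xs).length := by simp
    unfold find_chunks find_chunks_alt
    rw [pvOuter_runs (x :: xs) 0]
    have hA := pvA_loop (x :: xs) 0 h0 [] [PySem.List.pyGetD (x :: xs) 0 0]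
    norm_num at hA ⊢
    rw [hA, pvLoopA_runs]
    simp [pvRuns]
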